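-- pv_equiv track=rewrite | github.com/barteksmolkowski/adventofcode_2025 | 6Dzien.py | oblicz
-- ===== SOURCE A (Python) =====
-- import math
-- from typing import List
--
-- def oblicz(linie: List[str]) -> int:
--     max_dlugosc = max(len(l) for l in linie)
--     siatka = [list(l.ljust(max_dlugosc)) for l in linie]
--
--     wiersze = len(siatka)
--     cols = max_dlugosc
--
--     odzielacz = [all(siatka[r][c] == ' ' for r in range(wiersze)) for c in range(cols)]
--
--     grupy = []
--     c = 0
--     while c < cols:
--         if not odzielacz[c]:
--             start = c
--             while c < cols and not odzielacz[c]: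
--                 c += 1
--             grupy.append((start, c - 1))
--         else:
--             c += 1
--
--     wynik = 0
--     for start, koniec in grupy:
--         operator = siatka[-1][start]
--
--         liczby = []
--         for kol in range(koniec, start - 1, -1):
--             znaki = ''.join(siatka[r][kol] for r in range(wiersze - 1))
--             num = znaki.replace(' ', '')
--             if num == '':
--                 num = '0'
--             liczby.append(num)
--
--         wynik_liczby = [int(x) for x in liczby]
--         match operator:
--             case "+":
--                 wartosc = sum(wynik_liczby)
--             case "*":
--                 wartosc = math.prod(wynik_liczby)
--
--         wynik += wartosc
--
--     return wynik
-- ===== SOURCE B (Python) =====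
-- import math
--
--
-- def _wartosc(op, liczby):
--     if op == '+':
--         return sum(liczby)
--     elif op == '*':
--         return math.prod(liczby)
--     # unknown operator: returns None, so the caller's addition raises TypeError
--
--
-- def oblicz(linie):
--     szer = max(len(l) for l in linie)
--     kolumny = [''.join(k) for k in zip(*(l.ljust(szer) for l in linie))]
--
--     wynik = 0
--     grupa = []
--     for kol in kolumny + [' ' * len(linie)]:  # sentinel blank column flushes the last group
--         if kol.strip(' '):
--             grupa.append(kol)
--         elif grupa:
--             liczby = [int(k[:-1].replace(' ', '') or '0') for k in grupa]
--             wynik += _wartosc(grupa[0][-1], liczby)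
--             grupa = []
--     return wynik
-- ===== Notes on version B (the rewrite author's own statement) =====
-- stated objective: idiomatic
-- what changed: B transposes the padded grid into column strings and makes one left-to-right pass with a pending-group accumulator flushed at blank columns (sentinel at the end), instead of A's separator boolean table, index-interval while-loops and per-group reversed index scans with per-cell joins.
-- outside the precondition, e.g. on oblicz(['2 7', '*']): A returns 4, B raises TypeError
import Mathlib
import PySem

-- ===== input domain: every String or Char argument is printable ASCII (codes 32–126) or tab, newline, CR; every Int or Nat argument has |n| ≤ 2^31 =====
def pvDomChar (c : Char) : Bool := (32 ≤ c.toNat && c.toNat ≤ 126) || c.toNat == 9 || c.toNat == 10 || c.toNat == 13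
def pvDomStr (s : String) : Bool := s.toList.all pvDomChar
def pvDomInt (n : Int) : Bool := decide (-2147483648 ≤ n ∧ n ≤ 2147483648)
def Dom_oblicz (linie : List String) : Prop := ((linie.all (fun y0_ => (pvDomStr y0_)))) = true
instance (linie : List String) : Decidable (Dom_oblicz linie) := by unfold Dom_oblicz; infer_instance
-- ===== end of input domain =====

-- B transposes the padded grid into column strings and folds over them once with a pending-group
-- accumulator flushed at blank columns, instead of A's separator table + index-interval while loops.

-- ===== PORT A =====
-- shared with port B: both Pythons compute max(len(l) for l in linie) and l.ljust(width)
def pyMaxLen (linie : List String) : Nat :=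
  (linie.map (fun l => l.toList.length)).foldl max 0  -- max(...); Python raises ValueError on [], excluded by Pre_

def padRow (w : Nat) (l : String) : List Char :=
  l.toList ++ List.replicate (w - l.toList.length) ' '  -- l.ljust(w)

-- odzielacz = [all(siatka[r][c]==' ' for r in range(wiersze)) for c in range(cols)]
def aOdz (S : List (List Char)) (cols : Nat) : List Bool :=
  (List.range cols).map (fun c => (List.range S.length).all (fun r => ((S.getD r []).getD c ' ') == ' '))

-- inner: while c < cols and not odzielacz[c]: c += 1   (returns the final c)
def grupyInner (odz : List Bool) (cols c : Nat) : Nat :=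
  if c < cols ∧ odz.getD c true = false then grupyInner odz cols (c + 1) else c
termination_by cols - c
decreasing_by omega

theorem grupyInner_ge (odz : List Bool) (cols c : Nat) : c ≤ grupyInner odz cols c := by
  induction c using grupyInner.induct (odz := odz) (cols := cols) with
  | case1 c h ih => rw [grupyInner, if_pos h]; omega
  | case2 c h => rw [grupyInner, if_neg h]

-- outer while loop building grupy as (start, koniec) pairs
def grupyLoop (odz : List Bool) (cols c : Nat) : List (Nat × Nat) :=
  if h : c < cols then
    if hb : odz.getD c true = false then
      let c' := grupyInner odz cols c
      (c, c' - 1) :: grupyLoop odz cols c'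
    else grupyLoop odz cols (c + 1)
  else []
termination_by cols - c
decreasing_by
  · have h1 : c + 1 ≤ grupyInner odz cols c := by
      rw [grupyInner, if_pos ⟨h, hb⟩]; exact grupyInner_ge odz cols (c + 1)
    omega
  · omega

-- znaki = ''.join(siatka[r][kol] for r in range(wiersze-1)); num = znaki.replace(' ','') or '0'
def aNum (S : List (List Char)) (kol : Nat) : List Char :=
  let znaki := (List.range (S.length - 1)).map (fun r => (S.getD r []).getD kol ' ')
  let num := znaki.filter (· != ' ')          -- .replace(' ', '')
  if num = [] then ['0'] else num

-- the body of A's `for start, koniec in grupy` loop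
def aGrupaVal (S : List (List Char)) (se : Nat × Nat) : Int :=
  let operator := (S.getD (S.length - 1) []).getD se.1 ' '   -- siatka[-1][start]
  let liczby := (List.range (se.2 + 1 - se.1)).map (fun i => aNum S (se.2 - i))  -- range(koniec, start-1, -1)
  let wyn := liczby.map (fun x => (PySem.Int.ofChars? x).getD 0)  -- int(x); ValueError excluded by Pre_
  if operator == '+' then wyn.sum
  else if operator == '*' then wyn.foldl (· * ·) 1
  else 0  -- Python's match falls through here (stale/unbound wartosc); excluded by Pre_

def oblicz (linie : List String) : Int :=
  let maxd := pyMaxLen linie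
  let siatka := linie.map (padRow maxd)
  (grupyLoop (aOdz siatka maxd) maxd 0).foldl (fun wynik se => wynik + aGrupaVal siatka se) 0

-- ===== PORT B =====
-- zip(*padded): all padded rows have length szer, so szer columns
def kolumnyOf (szer : Nat) (padded : List (List Char)) : List (List Char) :=
  (List.range szer).map (fun c => padded.map (fun w => w.getD c ' '))

-- int(k[:-1].replace(' ', '') or '0')
def bNum (k : List Char) : Int :=
  let num := k.dropLast.filter (· != ' ')
  (PySem.Int.ofChars? (if num = [] then ['0'] else num)).getD 0  -- ValueError excluded by Pre_

-- _wartosc: returns None on an unknown operator (the caller's addition then raises TypeError)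
def wartoscOf (op : Char) (liczby : List Int) : Option Int :=
  if op == '+' then some liczby.sum
  else if op == '*' then some (liczby.foldl (· * ·) 1)
  else none

def bFlush (g : List (List Char)) : Int :=
  (wartoscOf ((g.headD []).getLastD ' ') (g.map bNum)).getD 0  -- TypeError on none excluded by Pre_

-- loop body: kol.strip(' ') nonempty test, append / flush
def bStep (st : Int × List (List Char)) (kol : List Char) : Int × List (List Char) :=
  if kol.any (· != ' ') then (st.1, st.2 ++ [kol])
  else if st.2 ≠ [] then (st.1 + bFlush st.2, [])
  else st

def oblicz_alt (linie : List String) : Int :=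
  let szer := pyMaxLen linie
  let kolumny := kolumnyOf szer (linie.map (padRow szer))
  ((kolumny ++ [List.replicate linie.length ' ']).foldl bStep (0, [])).1  -- sentinel blank column

-- ===== PRECONDITION & SPEC =====
-- Pre_'s view of the padded grid (uses only the shared helpers, not the ports)
def pvGrid (linie : List String) : List (List Char) := linie.map (padRow (pyMaxLen linie))
def pvColl (g : List (List Char)) (c : Nat) : List Char := g.map (fun w => w.getD c ' ')
def pvBlank (g : List (List Char)) (c : Nat) : Bool := (pvColl g c).all (· == ' ')
def pvNumStr (g : List (List Char)) (c : Nat) : List Char := (pvColl g c).dropLast.filter (· != ' ')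

-- Pre_ excludes: the empty list (A raises ValueError); any column whose non-last-row characters do not
-- form a Python int literal (A raises ValueError); and any column group whose operator character is not
-- '+' or '*', where A either raises UnboundLocalError or returns a stale value left over from the
-- previous group (an accident of A's match statement) while B's helper returns None and raises TypeError.
def Pre_oblicz (linie : List String) : Prop :=
  linie ≠ [] ∧
  ∀ c < pyMaxLen linie,
    ((pvBlank (pvGrid linie) c = false → (c = 0 ∨ pvBlank (pvGrid linie) (c - 1) = true) →
        (pvColl (pvGrid linie) c).getLastD ' ' = '+' ∨ (pvColl (pvGrid linie) c).getLastD ' ' = '*') ∧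
     (pvNumStr (pvGrid linie) c ≠ [] → (PySem.Int.ofChars? (pvNumStr (pvGrid linie) c)).isSome))

instance (linie : List String) : Decidable (Pre_oblicz linie) := by unfold Pre_oblicz; infer_instance

def pvWitness_oblicz : List String := ["1 2", "3 4", "+ *"]

def Spec_oblicz (linie : List String) (out : Int) : Prop := out = oblicz_alt linie
instance (linie : List String) (out : Int) : Decidable (Spec_oblicz linie out) := by unfold Spec_oblicz; infer_instance

-- ===== CLAIM (what is proved, stated in full; the proofs are below) =====
def Claim_equal_oblicz : Prop := ∀ (linie : List String), Dom_oblicz linie → Pre_oblicz linie → Spec_oblicz linie (oblicz linie)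

-- ===== LEMMAS AND PROOFS =====

theorem all_range_getD {α : Type} (xs : List α) (d : α) (q : α → Bool) :
    ((List.range xs.length).all fun r => q (xs.getD r d)) = xs.all q := by
  induction xs with
  | nil => rfl
  | cons x t ih =>
    simp only [List.length_cons, List.range_succ_eq_map, List.all_cons, List.all_map]
    simp only [List.getD_cons_zero, Function.comp_def, Nat.succ_eq_add_one, List.getD_cons_succ]
    rw [← ih]

theorem map_range_getD {α β : Type} (xs : List α) (d : α) (f : α → β) (k : Nat) (hk : k ≤ xs.length) :
    (List.range k).map (fun r => f (xs.getD r d)) = (xs.take k).map f := by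
  induction xs generalizing k with
  | nil => simp at hk; simp [hk]
  | cons x t ih =>
    cases k with
    | zero => simp
    | succ m =>
      simp only [List.range_succ_eq_map, List.map_cons, List.map_map]
      simp only [List.getD_cons_zero, Function.comp_def, Nat.succ_eq_add_one, List.getD_cons_succ]
      rw [ih m (by simpa using hk)]
      simp

theorem reverse_range (L : Nat) :
    (List.range L).reverse = (List.range L).map (fun i => L - 1 - i) := by
  induction L with
  | zero => rfl
  | succ m ih =>
    conv_lhs => rw [List.range_succ]
    conv_rhs => rw [List.range_succ_eq_map]
    rw [List.reverse_append, ih]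
    simp only [List.reverse_cons, List.reverse_nil, List.nil_append, List.map_cons, List.map_map,
      List.cons_append, Function.comp_def, Nat.succ_eq_add_one]
    congr 1
    apply List.map_congr_left
    intro i hi
    omega

theorem rev_range_map {β : Type} (L : Nat) (h : Nat → β) :
    ((List.range L).map h).reverse = (List.range L).map (fun i => h (L - 1 - i)) := by
  rw [← List.map_reverse, reverse_range, List.map_map]
  rfl

theorem foldl_add_eq (l : List (Nat × Nat)) (f : Nat × Nat → Int) (a : Int) :
    l.foldl (fun w se => w + f se) a = a + (l.map f).sum := by
  induction l generalizing a with
  | nil => simp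
  | cons x t ih => simp [ih, add_assoc]

theorem foldl_mul (l : List Int) (a : Int) : l.foldl (· * ·) a = a * l.prod := by
  induction l generalizing a with
  | nil => simp
  | cons x t ih => simp [ih, List.prod_cons, mul_assoc]

theorem segment_eq {α : Type} (K : List α) (d : α) (s L : Nat) (h : s + L ≤ K.length) :
    (K.drop s).take L = (List.range L).map (fun i => K.getD (s + i) d) := by
  apply List.ext_getElem
  · simp; omega
  · intro i h1 h2
    simp only [List.getElem_take, List.getElem_drop, List.getElem_map, List.getElem_range]
    rw [List.getD_eq_getElem K d (by simp at h1; omega)]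


-- facts about the transposed grid
theorem length_kolumnyOf (W : Nat) (S : List (List Char)) : (kolumnyOf W S).length = W := by
  simp [kolumnyOf]

theorem getD_kolumnyOf (W : Nat) (S : List (List Char)) (c : Nat) (hc : c < W) :
    (kolumnyOf W S).getD c [] = S.map (fun w => w.getD c ' ') := by
  rw [List.getD_eq_getElem _ _ (by simp [length_kolumnyOf, hc])]
  simp [kolumnyOf]

theorem odz_getD (S : List (List Char)) (W c : Nat) (hc : c < W) :
    (aOdz S W).getD c true = !((kolumnyOf W S).getD c []).any (· != ' ') := by
  rw [getD_kolumnyOf W S c hc]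
  unfold aOdz
  rw [List.getD_eq_getElem _ _ (by simp [hc])]
  simp only [List.getElem_map, List.getElem_range]
  rw [all_range_getD S [] (fun w => w.getD c ' ' == ' ')]
  rw [List.any_map]
  rw [List.all_eq_not_any_not]
  simp only [Function.comp_def, bne]

-- the per-column number string is the same on both sides
theorem num_eq (S : List (List Char)) (c : Nat) :
    bNum (S.map (fun w => w.getD c ' ')) = (PySem.Int.ofChars? (aNum S c)).getD 0 := by
  unfold bNum aNum
  rw [← List.map_dropLast, List.dropLast_eq_take,
    ← map_range_getD S [] (fun w => w.getD c ' ') (S.length - 1) (by omega)]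

-- the operator character is the same on both sides
theorem op_eq (S : List (List Char)) (s : Nat) :
    (S.map (fun w => w.getD s ' ')).getLastD ' ' = (S.getD (S.length - 1) []).getD s ' ' := by
  rcases S with _ | ⟨x, t⟩
  · rfl
  · rw [List.getLastD_eq_getLast?, List.getLast?_map, List.getLast?_eq_getElem?,
      List.getD_eq_getElem?_getD, List.getD_eq_getElem?_getD]
    have hlt : (x :: t).length - 1 < (x :: t).length := by simp
    rw [List.getElem?_eq_getElem hlt]
    simp

-- per-group value equality
theorem group_eq (S : List (List Char)) (W s e : Nat) (hs : s ≤ e) (he : e < W) :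
    aGrupaVal S (s, e) = bFlush (((kolumnyOf W S).drop s).take (e + 1 - s)) := by
  have hsL : s + (e + 1 - s) ≤ (kolumnyOf W S).length := by rw [length_kolumnyOf]; omega
  have hgeq : ((kolumnyOf W S).drop s).take (e + 1 - s)
      = (List.range (e + 1 - s)).map (fun i => (kolumnyOf W S).getD (s + i) []) :=
    segment_eq _ [] s _ hsL
  have hL : e + 1 - s = (e - s) + 1 := by omega
  have hhead : (((kolumnyOf W S).drop s).take (e + 1 - s)).headD []
      = S.map (fun w => w.getD s ' ') := by
    rw [hgeq, hL, List.range_succ_eq_map, List.map_cons, List.headD_cons]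
    simp only [Nat.add_zero]
    exact getD_kolumnyOf W S s (by omega)
  have hmap : (((kolumnyOf W S).drop s).take (e + 1 - s)).map bNum
      = (List.range (e + 1 - s)).map (fun i => (PySem.Int.ofChars? (aNum S (s + i))).getD 0) := by
    rw [hgeq, List.map_map]
    apply List.map_congr_left
    intro i hi
    rw [List.mem_range] at hi
    simp only [Function.comp_def]
    rw [getD_kolumnyOf W S (s + i) (by omega), num_eq]
  have hwyn : (List.range (e + 1 - s)).map (fun i => (PySem.Int.ofChars? (aNum S (e - i))).getD 0)
      = ((((kolumnyOf W S).drop s).take (e + 1 - s)).map bNum).reverse := by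
    rw [hmap, rev_range_map]
    apply List.map_congr_left
    intro i hi
    simp only [List.mem_range] at hi
    have : e - i = s + (e + 1 - s - 1 - i) := by omega
    rw [this]
  simp only [aGrupaVal, bFlush, wartoscOf]
  rw [hhead, op_eq]
  simp only [List.map_map, Function.comp_def]
  rw [hwyn]
  by_cases h1 : ((S.getD (S.length - 1) []).getD s ' ' == '+') = true
  · rw [if_pos h1, if_pos h1, Option.getD_some]
    exact List.sum_reverse _
  · by_cases h2 : ((S.getD (S.length - 1) []).getD s ' ' == '*') = true
    · rw [if_neg h1, if_neg h1, if_pos h2, if_pos h2, Option.getD_some]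
      rw [foldl_mul, foldl_mul, List.prod_reverse]
    · rw [if_neg h1, if_neg h1, if_neg h2, if_neg h2]
      rfl

-- bounds for the intervals grupyLoop produces
theorem grupyInner_le (odz : List Bool) (cols c : Nat) (h : c ≤ cols) :
    grupyInner odz cols c ≤ cols := by
  induction c using grupyInner.induct (odz := odz) (cols := cols) with
  | case1 c h1 ih => rw [grupyInner, if_pos h1]; exact ih (by omega)
  | case2 c h1 => rw [grupyInner, if_neg h1]; exact h

theorem grupyInner_stop (odz : List Bool) (cols c : Nat) :
    ¬(grupyInner odz cols c < cols ∧ odz.getD (grupyInner odz cols c) true = false) := by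
  induction c using grupyInner.induct (odz := odz) (cols := cols) with
  | case1 c h1 ih => rw [grupyInner, if_pos h1]; exact ih
  | case2 c h1 => rw [grupyInner, if_neg h1]; exact h1

theorem grupyLoop_mem (odz : List Bool) (cols c : Nat) :
    ∀ se ∈ grupyLoop odz cols c, c ≤ se.1 ∧ se.1 ≤ se.2 ∧ se.2 < cols := by
  induction c using grupyLoop.induct (odz := odz) (cols := cols) with
  | case1 c h1 h2 c' ih =>
    intro se hse
    rw [grupyLoop, dif_pos h1, dif_pos h2] at hse
    have hgt : c + 1 ≤ grupyInner odz cols c := by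
      rw [grupyInner, if_pos ⟨h1, h2⟩]; exact grupyInner_ge odz cols (c + 1)
    have hle : grupyInner odz cols c ≤ cols := grupyInner_le odz cols c (by omega)
    rw [List.mem_cons] at hse
    rcases hse with hse | hse
    · subst hse; simp only []; omega
    · have := ih se hse; omega
  | case2 c h1 h2 ih =>
    intro se hse
    rw [grupyLoop, dif_pos h1, dif_neg h2] at hse
    have := ih se hse; omega
  | case3 c h1 =>
    intro se hse
    rw [grupyLoop, dif_neg h1] at hse
    simp at hse

-- B's fold walks through one whole group exactly as grupyInner does
theorem inner_fold (K : List (List Char)) (odz : List Bool) (sent : List Char)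
    (hodz : ∀ c < K.length, odz.getD c true = !((K.getD c []).any (· != ' ')))
    (c : Nat) :
    ∀ (a : Int) (g : List (List Char)),
      List.foldl bStep (a, g) (K.drop c ++ [sent]) =
      List.foldl bStep (a, g ++ (K.drop c).take (grupyInner odz K.length c - c))
        (K.drop (grupyInner odz K.length c) ++ [sent]) := by
  induction c using grupyInner.induct (odz := odz) (cols := K.length) with
  | case1 c h1 ih =>
    intro a g
    have hP : (K.getD c []).any (· != ' ') = true := by
      have := hodz c h1.1; rw [h1.2] at this
      simpa using this.symm
    have hdrop : K.drop c = K[c] :: K.drop (c + 1) := List.drop_eq_getElem_cons h1.1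
    have hKc : K.getD c [] = K[c] := List.getD_eq_getElem K [] h1.1
    rw [hdrop]
    simp only [List.cons_append, List.foldl_cons]
    have hstep : bStep (a, g) K[c] = (a, g ++ [K[c]]) := by
      unfold bStep; rw [if_pos (by rw [← hKc]; exact hP)]
    rw [hstep, ih a (g ++ [K[c]])]
    have hgt : c + 1 ≤ grupyInner odz K.length (c + 1) := grupyInner_ge odz K.length (c + 1)
    have hrec : grupyInner odz K.length c = grupyInner odz K.length (c + 1) := by
      conv_lhs => rw [grupyInner, if_pos h1]
    rw [← hrec]
    have hseg : (K[c] :: K.drop (c + 1)).take (grupyInner odz K.length c - c) =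
        K[c] :: (K.drop (c + 1)).take (grupyInner odz K.length c - (c + 1)) := by
      have : grupyInner odz K.length c - c = (grupyInner odz K.length c - (c + 1)) + 1 := by
        rw [hrec]; omega
      rw [this, List.take_succ_cons]
    rw [hseg]
    simp [List.append_assoc]
  | case2 c h1 =>
    intro a g
    rw [grupyInner, if_neg h1]
    simp

-- the main correspondence: B's single pass computes A's per-group sum
theorem main_fold (K : List (List Char)) (odz : List Bool) (sent : List Char)
    (hodz : ∀ c < K.length, odz.getD c true = !((K.getD c []).any (· != ' ')))
    (hsent : sent.any (· != ' ') = false)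
    (c : Nat) :
    ∀ (a : Int),
      (List.foldl bStep (a, []) (K.drop c ++ [sent])).1 =
      a + ((grupyLoop odz K.length c).map
            (fun se => bFlush ((K.drop se.1).take (se.2 + 1 - se.1)))).sum := by
  induction c using grupyLoop.induct (odz := odz) (cols := K.length) with
  | case1 c h1 h2 c' ih =>
    intro a
    rw [inner_fold K odz sent hodz c a []]
    have hgt : c + 1 ≤ grupyInner odz K.length c := by
      rw [grupyInner, if_pos ⟨h1, h2⟩]; exact grupyInner_ge odz K.length (c + 1)
    have hle : grupyInner odz K.length c ≤ K.length := grupyInner_le odz K.length c (by omega)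
    have hstop := grupyInner_stop odz K.length c
    set ci := grupyInner odz K.length c with hci
    have hg : (K.drop c).take (ci - c) ≠ [] := by
      apply List.ne_nil_of_length_pos
      simp only [List.length_take, List.length_drop]
      omega
    have hloop : grupyLoop odz K.length c = (c, ci - 1) :: grupyLoop odz K.length ci := by
      rw [grupyLoop, dif_pos h1, dif_pos h2]
    rw [hloop]
    simp only [List.nil_append, List.map_cons, List.sum_cons]
    have hseg : ci - 1 + 1 - c = ci - c := by omega
    by_cases hW : ci < K.length
    · have hodzc : odz.getD ci true = true := by
        rcases h : odz.getD ci true with _ | _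
        · exact absurd ⟨hW, h⟩ hstop
        · rfl
      have hP : (K.getD ci []).any (· != ' ') = false := by
        have := hodz ci hW
        rw [hodzc] at this
        rcases h : (K.getD ci []).any (· != ' ') with _ | _
        · rfl
        · rw [h] at this; simp at this
      have hPe : (K[ci].any (· != ' ')) = false := by
        rw [← List.getD_eq_getElem K [] hW]; exact hP
      have hdropc : K.drop ci = K[ci] :: K.drop (ci + 1) := List.drop_eq_getElem_cons hW
      have hskip : ∀ (x : Int), List.foldl bStep (x, []) (K.drop ci ++ [sent]) =
          List.foldl bStep (x, []) (K.drop (ci + 1) ++ [sent]) := by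
        intro x
        rw [hdropc]
        simp only [List.cons_append, List.foldl_cons]
        have : bStep (x, ([] : List (List Char))) K[ci] = (x, []) := by
          unfold bStep
          rw [if_neg (by rw [hPe]; simp), if_neg (by simp)]
        rw [this]
      have hflush : bStep (a, (K.drop c).take (ci - c)) K[ci]
          = (a + bFlush ((K.drop c).take (ci - c)), []) := by
        unfold bStep
        rw [if_neg (by rw [hPe]; simp), if_pos hg]
      rw [hdropc]
      simp only [List.cons_append, List.foldl_cons]
      rw [hflush, ← hskip, ih]
      rw [hseg]
      ring
    · have hcieq : ci = K.length := by omega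
      have hdropnil : K.drop ci = [] := List.drop_eq_nil_of_le (by omega)
      have hloopnil : grupyLoop odz K.length ci = [] := by
        rw [grupyLoop, dif_neg hW]
      rw [hdropnil, hloopnil]
      simp only [List.nil_append, List.foldl_cons, List.foldl_nil, List.map_nil, List.sum_nil]
      have : bStep (a, (K.drop c).take (ci - c)) sent
          = (a + bFlush ((K.drop c).take (ci - c)), []) := by
        unfold bStep
        rw [if_neg (by rw [hsent]; simp), if_pos hg]
      rw [this, hseg]
      simp
  | case2 c h1 h2 ih =>
    intro a
    have hodzc : odz.getD c true = true := by
      rcases h : odz.getD c true with _ | _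
      · exact absurd h h2
      · rfl
    have hP : (K[c].any (· != ' ')) = false := by
      have := hodz c h1
      rw [hodzc] at this
      rw [← List.getD_eq_getElem K [] h1]
      rcases h : (K.getD c []).any (· != ' ') with _ | _
      · rfl
      · rw [h] at this; simp at this
    rw [List.drop_eq_getElem_cons h1]
    simp only [List.cons_append, List.foldl_cons]
    have : bStep (a, ([] : List (List Char))) K[c] = (a, []) := by
      unfold bStep
      rw [if_neg (by rw [hP]; simp), if_neg (by simp)]
    rw [this, ih]
    conv_rhs => rw [grupyLoop, dif_pos h1, dif_neg h2]
  | case3 c h1 =>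
    intro a
    rw [List.drop_eq_nil_of_le (by omega), grupyLoop, dif_neg h1]
    simp only [List.nil_append, List.foldl_cons, List.foldl_nil, List.map_nil, List.sum_nil]
    have : bStep (a, ([] : List (List Char))) sent = (a, []) := by
      unfold bStep
      rw [if_neg (by rw [hsent]; simp), if_neg (by simp)]
    rw [this]
    simp

theorem oblicz_equiv (linie : List String) : oblicz linie = oblicz_alt linie := by
  simp only [oblicz, oblicz_alt]
  set W := pyMaxLen linie with hW
  set S := linie.map (padRow W) with hS
  have hKlen : (kolumnyOf W S).length = W := length_kolumnyOf W S
  have hodz : ∀ c < (kolumnyOf W S).length,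
      (aOdz S W).getD c true = !(((kolumnyOf W S).getD c []).any (· != ' ')) := by
    intro c hc
    rw [hKlen] at hc
    exact odz_getD S W c hc
  have hsent : ((List.replicate linie.length ' ').any (· != ' ')) = false := by simp
  have hmain := main_fold (kolumnyOf W S) (aOdz S W) (List.replicate linie.length ' ')
    hodz hsent 0 0
  rw [List.drop_zero, hKlen] at hmain
  rw [foldl_add_eq]
  have hcongr : (grupyLoop (aOdz S W) W 0).map (fun se => aGrupaVal S se)
      = (grupyLoop (aOdz S W) W 0).map
          (fun se => bFlush (((kolumnyOf W S).drop se.1).take (se.2 + 1 - se.1))) := by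
    apply List.map_congr_left
    intro se hse
    have hb := grupyLoop_mem (aOdz S W) W 0 se hse
    exact group_eq S W se.1 se.2 hb.2.1 hb.2.2
  rw [hcongr]
  exact hmain.symm

-- ===== VERDICT (by name: the statement is the Claim_ definition above) =====
theorem oblicz_spec : Claim_equal_oblicz := by
  intro linie _ _
  unfold Spec_oblicz
  exact oblicz_equiv linie
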